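-- pv_equiv track=rewrite | github.com/wyf162/pythonProject | leetcode/contest/2022/06/week-299-20220626.py | countHousePlacements
-- ===== SOURCE A (Python) =====
-- def countHousePlacements(n: int) -> int:
--     dp = [[0] * 4 for _ in range(n)]
--     dp[0] = [1] * 4
--
--     for i in range(1, n):
--         dp[i][0] = dp[i - 1][0] + dp[i - 1][1] + dp[i - 1][2] + dp[i - 1][3]
--         dp[i][1] = dp[i - 1][0] + dp[i - 1][2]
--         dp[i][2] = dp[i - 1][0] + dp[i - 1][1]
--         dp[i][3] = dp[i - 1][0]
--     return sum(dp[-1])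
-- ===== SOURCE B (Python) =====
-- def countHousePlacements(n: int) -> int:
--     # Fibonacci fast doubling: answer = F(n+2)^2
--     def fd(k):
--         # returns (F(k), F(k+1))
--         if k == 0:
--             return (0, 1)
--         a, b = fd(k >> 1)
--         c = a * (2 * b - a)
--         d = a * a + b * b
--         if k & 1:
--             return (d, c + d)
--         return (c, d)
--     f = fd(n + 2)[0]
--     return f * f
-- ===== Notes on version B (the rewrite author's own statement) =====
-- stated objective: faster
-- what changed: Replaced the linear four-state DP table with Fibonacci fast doubling, using the closed form answer = F(n+2)^2.
import Mathlib
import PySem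

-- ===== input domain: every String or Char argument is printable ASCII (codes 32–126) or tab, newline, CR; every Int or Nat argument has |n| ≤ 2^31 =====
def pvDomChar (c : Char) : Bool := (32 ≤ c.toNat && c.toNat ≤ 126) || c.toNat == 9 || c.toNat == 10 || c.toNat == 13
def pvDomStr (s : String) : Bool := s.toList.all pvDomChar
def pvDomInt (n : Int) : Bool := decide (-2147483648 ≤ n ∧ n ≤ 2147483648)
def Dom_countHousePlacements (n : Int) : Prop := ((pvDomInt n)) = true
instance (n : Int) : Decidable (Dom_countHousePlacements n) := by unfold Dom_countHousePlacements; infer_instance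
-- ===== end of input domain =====

-- B replaces the O(n) four-state DP table with Fibonacci fast doubling (answer = F(n+2)^2), asymptotically fewer bignum operations.

-- ===== PORT A =====
-- helper: the row dp[i] built from dp[i-1] (the four assignments of the loop body)
def pvStepRow (prev : List Int) : List Int :=
  [PySem.List.pyGetD prev 0 0 + PySem.List.pyGetD prev 1 0 + PySem.List.pyGetD prev 2 0 + PySem.List.pyGetD prev 3 0,
   PySem.List.pyGetD prev 0 0 + PySem.List.pyGetD prev 2 0,
   PySem.List.pyGetD prev 0 0 + PySem.List.pyGetD prev 1 0,
   PySem.List.pyGetD prev 0 0]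

def pvStepFn (dp : List (List Int)) (i : Int) : List (List Int) :=
  PySem.List.pySetD dp i (pvStepRow (PySem.List.pyGetD dp (i - 1) []))

def countHousePlacements (n : Int) : Int :=
  let dp0 : List (List Int) := (PySem.List.pyRange 0 n 1).map (fun _ => List.replicate 4 (0 : Int))
  let dp1 := PySem.List.pySetD dp0 0 (List.replicate 4 (1 : Int))
  let dp := (PySem.List.pyRange 1 n 1).foldl pvStepFn dp1
  (PySem.List.pyGetD dp (-1) []).sum

-- ===== PORT B =====
-- fast doubling: pvFd k = (F(k), F(k+1))
def pvFd : Nat → Int × Int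
  | 0 => (0, 1)
  | (k + 1) =>
    let p := pvFd ((k + 1) / 2)
    let a := p.1
    let b := p.2
    let c := a * (2 * b - a)
    let d := a * a + b * b
    if (k + 1) % 2 = 1 then (d, c + d) else (c, d)
decreasing_by omega

def countHousePlacements_alt (n : Int) : Int :=
  let f := (pvFd (n + 2).toNat).1
  f * f

-- ===== PRECONDITION & SPEC =====
-- Pre_: on every non-positive n the Python A raises IndexError (it assigns into an empty dp list).
def Pre_countHousePlacements (n : Int) : Prop := 1 ≤ n
instance (n : Int) : Decidable (Pre_countHousePlacements n) := by unfold Pre_countHousePlacements; infer_instance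
def pvWitness_countHousePlacements : Int := 3

def Spec_countHousePlacements (n : Int) (out : Int) : Prop := out = countHousePlacements_alt n
instance (n : Int) (out : Int) : Decidable (Spec_countHousePlacements n out) := by unfold Spec_countHousePlacements; infer_instance

-- ===== CLAIM (what is proved, stated in full; the proofs are below) =====
def Claim_equal_countHousePlacements : Prop := ∀ (n : Int), Dom_countHousePlacements n → Pre_countHousePlacements n → Spec_countHousePlacements n (countHousePlacements n)

-- ===== LEMMAS AND PROOFS =====
def fI (k : Nat) : Int := (Nat.fib k : Int)

lemma fI_add_two (k : Nat) : fI (k + 2) = fI k + fI (k + 1) := by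
  simp [fI, Nat.fib_add_two]

lemma pvFd_eq (k : Nat) : pvFd k = (fI k, fI (k + 1)) := by
  induction k using Nat.strong_induction_on with
  | _ k ih =>
    match k with
    | 0 => simp [pvFd, fI]
    | (j + 1) =>
      have h2 : (j + 1) / 2 < j + 1 := by omega
      rw [pvFd]
      rw [ih _ h2]
      set m := (j + 1) / 2 with hm
      have heven : fI (2 * m) = fI m * (2 * fI (m + 1) - fI m) := by
        have hle : Nat.fib m ≤ 2 * Nat.fib (m + 1) :=
          le_trans (Nat.fib_le_fib_succ) (Nat.le_mul_of_pos_left _ two_pos)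
        have h := Nat.fib_two_mul m
        simp only [fI]
        rw [h]
        push_cast [hle]
        ring
      have hodd : fI (2 * m + 1) = fI m * fI m + fI (m + 1) * fI (m + 1) := by
        have h := Nat.fib_two_mul_add_one m
        simp only [fI]
        rw [h]
        push_cast
        ring
      rcases Nat.even_or_odd (j + 1) with he | ho
      · rw [Nat.even_iff] at he
        have hmod : ¬ ((j + 1) % 2 = 1) := by omega
        have hj : j + 1 = 2 * m := by omega
        simp only [hmod, if_false]
        rw [hj, heven, hodd]
      · rw [Nat.odd_iff] at ho
        have hj : j + 1 = 2 * m + 1 := by omega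
        simp only [ho, if_true]
        rw [hj]
        have h4 : 2 * m + 1 + 1 = 2 * m + 2 := by omega
        rw [h4, fI_add_two (2 * m), heven, hodd]

-- the row dp[k] holds [F(k+2)^2, F(k+2)F(k+1), F(k+2)F(k+1), F(k+1)^2]
def pvRow (k : Nat) : List Int :=
  [fI (k + 2) * fI (k + 2), fI (k + 2) * fI (k + 1), fI (k + 2) * fI (k + 1), fI (k + 1) * fI (k + 1)]

lemma pvStep_lit (a b c d : Int) : pvStepRow [a, b, c, d] = [a + b + c + d, a + c, a + b, a] := by
  simp [pvStepRow, PySem.List.pyGetD, PySem.List.pyGet?, PySem.List.pyIdx?]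

lemma pvStepRow_row (k : Nat) : pvStepRow (pvRow k) = pvRow (k + 1) := by
  have h3 : fI (k + 3) = fI (k + 1) + fI (k + 2) := by
    have h := fI_add_two (k + 1)
    have e : k + 1 + 2 = k + 3 := by omega
    have e2 : k + 1 + 1 = k + 2 := by omega
    rw [e, e2] at h; exact h
  rw [pvRow, pvStep_lit, pvRow]
  rw [show k + 1 + 2 = k + 3 from by omega, show k + 1 + 1 = k + 2 from by omega, h3]
  simp only [List.cons.injEq, and_true]
  and_intros <;> ring

lemma loop_inv (m : Nat) : ∀ (k : Nat) (dp : List (List Int)), 1 ≤ k → k + m ≤ dp.length →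
    PySem.List.pyGetD dp ((k : Int) - 1) [] = pvRow (k - 1) →
    (((List.range m).map (fun j : Nat => ((k : Int) + (j : Int)))).foldl pvStepFn dp).length = dp.length ∧
    PySem.List.pyGetD (((List.range m).map (fun j : Nat => ((k : Int) + (j : Int)))).foldl pvStepFn dp) ((k : Int) + m - 1) [] = pvRow (k + m - 1) := by
  induction m with
  | zero =>
    intro k dp hk hlen hprev
    simp only [List.range_zero, List.map_nil, List.foldl_nil, Nat.cast_zero, add_zero]
    exact ⟨trivial, hprev⟩
  | succ m ih =>
    intro k dp hk hlen hprev
    have hklen : k < dp.length := by omega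
    rw [List.range_succ_eq_map]
    simp only [List.map_cons, List.map_map, List.foldl_cons]
    have hstep : pvStepFn dp ((k : Int) + ((0 : Nat) : Int)) = PySem.List.pySetD dp (k : Int) (pvRow k) := by
      have h0 : ((k : Int) + ((0 : Nat) : Int)) = (k : Int) := by push_cast; ring
      rw [h0]
      unfold pvStepFn
      rw [hprev, pvStepRow_row]
      have hk1 : k - 1 + 1 = k := by omega
      rw [hk1]
    rw [hstep]
    have hfun : ((fun j : Nat => ((k : Int) + ↑j)) ∘ Nat.succ) = (fun j : Nat => (((k + 1 : Nat) : Int) + ↑j)) := by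
      funext j
      simp only [Function.comp_apply]
      push_cast
      ring
    rw [hfun]
    have hlen' : (k + 1) + m ≤ (PySem.List.pySetD dp (k : Int) (pvRow k)).length := by
      rw [PySem.List.length_pySetD]; omega
    have hprev' : PySem.List.pyGetD (PySem.List.pySetD dp (k : Int) (pvRow k)) (((k + 1 : Nat) : Int) - 1) [] = pvRow ((k + 1) - 1) := by
      have h1 : (((k + 1 : Nat) : Int) - 1) = (k : Int) := by push_cast; ring
      rw [h1, PySem.List.pyGetD_pySetD_natCast dp k k (pvRow k) [] hklen]
      simp
    obtain ⟨hL, hG⟩ := ih (k + 1) (PySem.List.pySetD dp (k : Int) (pvRow k)) (by omega) hlen' hprev'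
    refine ⟨?_, ?_⟩
    · rw [hL, PySem.List.length_pySetD]
    · have harith : ((k : Int) + ((m + 1 : Nat) : Int) - 1) = (((k + 1 : Nat) : Int) + (m : Int) - 1) := by push_cast; ring
      have hidx : k + (m + 1) - 1 = (k + 1) + m - 1 := by omega
      rw [harith, hidx]
      exact hG

lemma prev0 (dp0 : List (List Int)) (h : 0 < dp0.length) :
    PySem.List.pyGetD (PySem.List.pySetD dp0 (0 : Int) (List.replicate 4 (1 : Int))) (((1 : Nat) : Int) - 1) [] = pvRow (1 - 1) := by
  have h0 : ((0 : Int)) = ((0 : Nat) : Int) := by simp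
  rw [h0, show (((1 : Nat) : Int) - 1) = ((0 : Nat) : Int) from by push_cast,
     PySem.List.pyGetD_pySetD_natCast dp0 0 0 _ [] h, if_pos rfl]
  decide

lemma main_eq (n : Int) (hp : 1 ≤ n) : countHousePlacements n = countHousePlacements_alt n := by
  simp only [countHousePlacements, countHousePlacements_alt]
  set M := (n - 1).toNat with hM
  have hrange : PySem.List.pyRange 1 n 1 = (List.range M).map (fun j : Nat => (((1 : Nat) : Int) + (j : Int))) := by
    rw [PySem.List.pyRange_one]
    congr 1
  rw [hrange]
  have hlen0 : ((PySem.List.pyRange 0 n 1).map (fun _ => List.replicate 4 (0 : Int))).length = n.toNat := by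
    simp [PySem.List.length_pyRange_one]
  have h0lt : 0 < ((PySem.List.pyRange 0 n 1).map (fun _ => List.replicate 4 (0 : Int))).length := by
    omega
  have hlen1 : 1 + M ≤ (PySem.List.pySetD ((PySem.List.pyRange 0 n 1).map (fun _ => List.replicate 4 (0 : Int))) (0 : Int) (List.replicate 4 (1 : Int))).length := by
    rw [PySem.List.length_pySetD]
    omega
  obtain ⟨hL, hG⟩ := loop_inv M 1
    (PySem.List.pySetD ((PySem.List.pyRange 0 n 1).map (fun _ => List.replicate 4 (0 : Int))) (0 : Int) (List.replicate 4 (1 : Int)))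
    (le_refl 1) hlen1 (prev0 _ h0lt)
  set L := ((List.range M).map (fun j : Nat => (((1 : Nat) : Int) + (j : Int)))).foldl pvStepFn
    (PySem.List.pySetD ((PySem.List.pyRange 0 n 1).map (fun _ => List.replicate 4 (0 : Int))) (0 : Int) (List.replicate 4 (1 : Int))) with hLdef
  have hLlen : L.length = n.toNat := by
    rw [hL, PySem.List.length_pySetD]
    omega
  have hidx : (((1 : Nat) : Int) + (M : Int) - 1) = ((M : Nat) : Int) := by push_cast; ring
  rw [hidx] at hG
  rw [PySem.List.pyGetD_natCast] at hG
  have hMlt : M < L.length := by omega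
  rw [List.getD_eq_getElem L [] hMlt] at hG
  have hsum0 : 1 + M - 1 = M := by omega
  rw [hsum0] at hG
  rw [PySem.List.pyGetD_neg_ofNat L 1 [] (by omega) (by omega)]
  have hLM : L.length - 1 = M := by omega
  simp only [hLM]
  rw [hG]
  rw [pvFd_eq]
  have hn2 : (n + 2).toNat = M + 3 := by omega
  rw [hn2]
  have h1 : fI (M + 3) = fI (M + 1) + fI (M + 2) := by
    have h := fI_add_two (M + 1)
    rw [show M + 1 + 2 = M + 3 from by omega, show M + 1 + 1 = M + 2 from by omega] at h
    exact h
  rw [pvRow]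
  simp only [List.sum_cons, List.sum_nil, add_zero]
  rw [h1]
  ring

theorem countHousePlacements_spec : Claim_equal_countHousePlacements := by
  intro n _ hp
  unfold Spec_countHousePlacements
  exact main_eq n hp
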